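-- pv_equiv track=rewrite | github.com/chinmay1596/Data-structures-and-algoritms | new.py | string_len
-- ===== SOURCE A (Python) =====
-- def string_len(s: str, index):
--     count = 0
--     if index == len(s):
--         return count
--     count += 1
--     a = string_len(s, index + 1)
--     count += a
--     return count
-- ===== SOURCE B (Python) =====
-- def string_len(s: str, index):
--     return len(s) - index
-- ===== Notes on version B (the rewrite author's own statement) =====
-- stated objective: simpler
-- what changed: Replaces the per-character recursion (1 + recursive call until index == len(s)) with the closed-form expression len(s) - index.
import Mathlib
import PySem

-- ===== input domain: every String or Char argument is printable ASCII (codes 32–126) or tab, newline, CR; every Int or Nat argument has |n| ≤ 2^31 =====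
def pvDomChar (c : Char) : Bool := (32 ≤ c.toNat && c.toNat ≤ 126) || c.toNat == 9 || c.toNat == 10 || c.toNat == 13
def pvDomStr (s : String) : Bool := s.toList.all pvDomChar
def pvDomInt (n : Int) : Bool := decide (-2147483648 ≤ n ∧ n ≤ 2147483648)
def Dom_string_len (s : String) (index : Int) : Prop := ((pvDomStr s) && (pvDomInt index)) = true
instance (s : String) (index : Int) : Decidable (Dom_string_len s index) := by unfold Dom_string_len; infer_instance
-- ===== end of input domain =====

-- B replaces A's per-character recursion with the closed form len(s) - index (simpler, O(1)).
-- ===== PORT A =====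
def string_len (s : String) (index : Int) : Int :=
  -- count = 0; if index == len(s): return count; count += 1; a = rec; count += a; return count
  if index = PySem.Str.len s then 0
  else if PySem.Str.len s < index then 0  -- totality guard: Python raises RecursionError here; outside Pre_
  else 1 + string_len s (index + 1)
termination_by (PySem.Str.len s - index).toNat
decreasing_by simp_all; omega

-- ===== PORT B =====
def string_len_alt (s : String) (index : Int) : Int :=
  PySem.Str.len s - index

-- ===== PRECONDITION & SPEC =====
-- Pre_ excludes index > len(s), where Python A raises RecursionError (no return value).
def Pre_string_len (s : String) (index : Int) : Prop := index ≤ PySem.Str.len s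
instance (s : String) (index : Int) : Decidable (Pre_string_len s index) := by unfold Pre_string_len; infer_instance
def pvWitness_string_len : String × Int := ("ab", 0)

def Spec_string_len (s : String) (index : Int) (out : Int) : Prop := out = string_len_alt s index
instance (s : String) (index : Int) (out : Int) : Decidable (Spec_string_len s index out) := by unfold Spec_string_len; infer_instance

-- ===== CLAIM (what is proved, stated in full; the proofs are below) =====
def Claim_equal_string_len : Prop := ∀ (s : String) (index : Int), Dom_string_len s index → Pre_string_len s index → Spec_string_len s index (string_len s index)

-- ===== LEMMAS AND PROOFS =====
theorem string_len_closed (s : String) : ∀ (n : Nat) (index : Int),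
    index ≤ PySem.Str.len s → (PySem.Str.len s - index).toNat = n →
    string_len s index = PySem.Str.len s - index := by
  intro n
  induction n with
  | zero =>
    intro index hle h0
    have heq : index = PySem.Str.len s := by omega
    rw [string_len]; simp [heq]
  | succ n ih =>
    intro index hle hn
    have hne : ¬ index = PySem.Str.len s := by omega
    have hng : ¬ PySem.Str.len s < index := by omega
    rw [string_len]
    simp only [hne, hng, if_false]
    rw [ih (index + 1) (by omega) (by omega)]
    ring

-- ===== VERDICT (by name: the statement is the Claim_ definition above) =====
theorem string_len_spec : Claim_equal_string_len := by
  intro s index _ hpre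
  unfold Spec_string_len string_len_alt
  exact string_len_closed s (PySem.Str.len s - index).toNat index hpre rfl
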